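-- pv_equiv track=rewrite | github.com/NIkok0/DDFed-main | ddfed_fl/FedAvg/server/secure_packing.py | unpack_plaintext
-- ===== SOURCE A (Python) =====
-- from typing import Iterable, List, Optional, Sequence, Tuple
--
-- def unpack_plaintext(packed_value: int, pack_size: int, slot_bits: int) -> List[int]:
--     """Unpack fixed-width slots from packed integer (little-endian)."""
--     out = []
--     mask = (1 << int(slot_bits)) - 1
--     x = int(packed_value)
--     for _ in range(int(pack_size)):
--         out.append(int(x & mask))
--         x >>= int(slot_bits)
--     return out
-- ===== SOURCE B (Python) =====
-- def unpack_plaintext(packed_value: int, pack_size: int, slot_bits: int) -> list: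
--     """Unpack fixed-width slots from packed integer (little-endian).
--
--     Divide-and-conquer: split the packed integer at the midpoint slot into
--     the high half (a shift) and the low half (the remainder), then recurse
--     on each half, instead of peeling one slot at a time off a running
--     accumulator.
--     """
--     slot_bits = int(slot_bits)
--     mask = (1 << slot_bits) - 1
--
--     def rec(x, n):
--         if n <= 0:
--             return []
--         if n == 1:
--             return [x & mask]
--         h = n // 2
--         cut = h * slot_bits
--         hi = x >> cut
--         return rec(x - (hi << cut), h) + rec(hi, n - h)
--
--     return rec(int(packed_value), int(pack_size))
-- ===== Notes on version B (the rewrite author's own statement) =====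
-- stated objective: alternative
-- what changed: Replaced the slot-by-slot loop that repeatedly shifts a running accumulator with a divide-and-conquer that splits the packed integer at the midpoint into the high half (a shift) and the low half (the remainder) and recurses on the two halves.
import Mathlib
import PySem

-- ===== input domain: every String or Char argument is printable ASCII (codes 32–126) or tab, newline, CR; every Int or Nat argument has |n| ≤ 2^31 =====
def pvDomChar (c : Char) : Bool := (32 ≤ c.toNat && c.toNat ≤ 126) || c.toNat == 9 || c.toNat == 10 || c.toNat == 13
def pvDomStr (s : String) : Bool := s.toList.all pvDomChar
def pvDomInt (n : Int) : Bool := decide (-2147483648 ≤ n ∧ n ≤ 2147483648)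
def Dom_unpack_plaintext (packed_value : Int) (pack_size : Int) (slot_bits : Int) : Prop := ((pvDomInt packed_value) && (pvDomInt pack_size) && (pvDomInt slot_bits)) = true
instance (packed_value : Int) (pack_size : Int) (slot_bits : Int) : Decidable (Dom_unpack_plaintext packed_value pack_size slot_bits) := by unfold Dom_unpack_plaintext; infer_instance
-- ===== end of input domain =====

-- B replaces A's slot-by-slot shifting loop with a divide-and-conquer that splits the
-- packed integer at the midpoint slot (high half = shift, low half = remainder) and
-- recurses on the two halves (objective: alternative).

-- ===== PORT A =====
-- mask = (1 << slot_bits) - 1; for _ in range(pack_size): out.append(x & mask); x >>= slot_bits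
-- (x & mask → PySem.Int.band; x >> slot_bits → Lean's >>> with slot_bits.toNat, exact for slot_bits ≥ 0, which Pre_ guarantees)
def unpack_plaintext (packed_value : Int) (pack_size : Int) (slot_bits : Int) : List Int :=
  let mask : Int := (1 : Int) <<< slot_bits.toNat - 1
  let st := (PySem.List.pyRange 0 pack_size 1).foldl
    (fun (st : List Int × Int) _ => (st.1 ++ [PySem.Int.band st.2 mask], st.2 >>> slot_bits.toNat))
    ([], packed_value)
  st.1

-- ===== PORT B =====
-- mask = (1 << slot_bits) - 1
-- def rec(x, n): if n <= 0: []; if n == 1: [x & mask]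
--                h = n // 2; cut = h * slot_bits; hi = x >> cut
--                rec(x - (hi << cut), h) + rec(hi, n - h)
-- (shifts via <<< / >>> on .toNat, exact for slot_bits ≥ 0; n // 2 → PySem.Int.floordiv)
def unpackRec (mask : Int) (slot_bits : Int) (x : Int) (n : Int) : List Int :=
  if n ≤ 0 then []
  else if n = 1 then [PySem.Int.band x mask]
  else
    let h := PySem.Int.floordiv n 2
    let cut := (h * slot_bits).toNat
    let hi := x >>> cut
    unpackRec mask slot_bits (x - (hi <<< cut)) h ++
      unpackRec mask slot_bits hi (n - h)
termination_by n.toNat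
decreasing_by
  · have hf : PySem.Int.floordiv n 2 = n / 2 :=
      PySem.Int.floordiv_eq_ediv_of_pos (by norm_num)
    simp only [hf]; omega
  · have hf : PySem.Int.floordiv n 2 = n / 2 :=
      PySem.Int.floordiv_eq_ediv_of_pos (by norm_num)
    simp only [hf]; omega

def unpack_plaintext_alt (packed_value : Int) (pack_size : Int) (slot_bits : Int) : List Int :=
  unpackRec ((1 : Int) <<< slot_bits.toNat - 1) slot_bits packed_value pack_size

-- ===== PRECONDITION & SPEC =====
-- Python raises ValueError ("negative shift count") in A for slot_bits < 0; nothing else raises.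
def Pre_unpack_plaintext (_packed_value : Int) (_pack_size : Int) (slot_bits : Int) : Prop := 0 ≤ slot_bits
instance (packed_value : Int) (pack_size : Int) (slot_bits : Int) : Decidable (Pre_unpack_plaintext packed_value pack_size slot_bits) := by unfold Pre_unpack_plaintext; infer_instance
def pvWitness_unpack_plaintext : Int × Int × Int := (2309, 3, 4)

def Spec_unpack_plaintext (packed_value : Int) (pack_size : Int) (slot_bits : Int) (out : List Int) : Prop := out = unpack_plaintext_alt packed_value pack_size slot_bits
instance (packed_value : Int) (pack_size : Int) (slot_bits : Int) (out : List Int) : Decidable (Spec_unpack_plaintext packed_value pack_size slot_bits out) := by unfold Spec_unpack_plaintext; infer_instance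

-- ===== CLAIM (what is proved, stated in full; the proofs are below) =====
def Claim_equal_unpack_plaintext : Prop := ∀ (packed_value : Int) (pack_size : Int) (slot_bits : Int), Dom_unpack_plaintext packed_value pack_size slot_bits → Pre_unpack_plaintext packed_value pack_size slot_bits → Spec_unpack_plaintext packed_value pack_size slot_bits (unpack_plaintext packed_value pack_size slot_bits)

-- ===== LEMMAS AND PROOFS =====

-- The common characterisation: slot k is (x / 2^(k·b)) % 2^b.
def slots (x : Int) (b : Nat) (n : Nat) : List Int :=
  (List.range n).map (fun k => (x / 2 ^ (k * b)) % 2 ^ b)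

-- Python's x & ((1 << c) - 1) is x mod 2^c, also for negative x (two's complement).
theorem band_mask (y : Int) (c : Nat) :
    PySem.Int.band y ((1 : Int) <<< c - 1) = y % 2 ^ c := by
  have h1 : (1 : Nat) ≤ 2 ^ c := Nat.one_le_two_pow
  have hmask : ((1 : Int) <<< c - 1) = ((2 ^ c - 1 : Nat) : Int) := by
    push_cast [h1]
    simp [Int.shiftLeft_eq]
  rw [hmask]
  unfold PySem.Int.band
  by_cases hy : 0 ≤ y
  · simp only [hy, if_true, if_pos (by positivity : (0 : Int) ≤ ((2 ^ c - 1 : Nat) : Int))]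
    rw [Int.toNat_natCast, Nat.and_two_pow_sub_one_eq_mod]
    conv_rhs => rw [← Int.toNat_of_nonneg hy]
    rw [Int.natCast_mod]
    push_cast
    rfl
  · have hpos : (0 : Int) ≤ ((2 ^ c - 1 : Nat) : Int) := by positivity
    simp only [hy, if_false, if_pos hpos]
    rw [Int.toNat_natCast]
    -- result = (2^c - 1) - ((2^c - 1) &&& n) where n = (-y - 1).toNat, y = -n - 1
    set n : Nat := (-y - 1).toNat with hn
    have hyn : y = -(n : Int) - 1 := by
      have : 0 ≤ -y - 1 := by omega
      omega
    have hand : (2 ^ c - 1) &&& n = n % 2 ^ c := by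
      rw [Nat.and_comm, Nat.and_two_pow_sub_one_eq_mod]
    rw [hand, hyn]
    have hd : n = 2 ^ c * (n / 2 ^ c) + n % 2 ^ c := (Nat.div_add_mod n (2 ^ c)).symm
    have hlt : n % 2 ^ c < 2 ^ c := Nat.mod_lt _ (Nat.two_pow_pos c)
    have hrw : (-(n : Int) - 1) =
        ((2 ^ c - 1 - n % 2 ^ c : Nat) : Int) + (-(n / 2 ^ c : Nat) - 1) * 2 ^ c := by
      push_cast [Nat.le_sub_one_of_lt hlt, h1]
      conv_lhs => rw [show (n : Int) = ((2 ^ c * (n / 2 ^ c) + n % 2 ^ c : Nat) : Int) by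
        exact_mod_cast hd]
      push_cast
      ring
    have hsmall : (2 ^ c - 1 - n % 2 ^ c : Nat) < 2 ^ c := by omega
    rw [hrw, Int.add_mul_emod_self_right, Int.emod_eq_of_lt (by positivity)
      (by exact_mod_cast hsmall)]

-- Dropping high bits (mod 2^M) does not change a window of B bits starting below M - B.
theorem window_emod (x : Int) (B K M : Nat) (h : K + B ≤ M) :
    x % 2 ^ M / 2 ^ K % 2 ^ B = x / 2 ^ K % 2 ^ B := by
  have hp : (2 : Int) ^ (M - K) * 2 ^ K = 2 ^ M := by
    rw [← pow_add, Nat.sub_add_cancel (by omega)]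
  have hsplit : x % 2 ^ M = x + (-(x / 2 ^ M) * 2 ^ (M - K)) * 2 ^ K := by
    rw [Int.emod_def, mul_assoc, hp]; ring
  rw [hsplit, Int.add_mul_ediv_right _ _ (by positivity : (2 : Int) ^ K ≠ 0)]
  have h2 : -(x / 2 ^ M) * 2 ^ (M - K) = -(x / 2 ^ M) * 2 ^ (M - K - B) * 2 ^ B := by
    rw [mul_assoc, ← pow_add, Nat.sub_add_cancel (by omega)]
  rw [h2, Int.add_mul_emod_self_right]

-- slots splits at any midpoint h: low part from x mod 2^(h·b), high part from x / 2^(h·b).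
theorem slots_split (x : Int) (b h m : Nat) :
    slots x b (h + m) = slots (x % 2 ^ (h * b)) b h ++ slots (x / 2 ^ (h * b)) b m := by
  unfold slots
  rw [List.range_add, List.map_append, List.map_map]
  congr 1
  · refine List.map_congr_left fun k hk => ?_
    have hk' : k < h := List.mem_range.mp hk
    by_cases hb : b = 0
    · simp [hb]
    · refine (window_emod x b (k * b) (h * b) ?_).symm
      have h2 : k * b + b ≤ h * b := by
        calc k * b + b = (k + 1) * b := by ring
          _ ≤ h * b := Nat.mul_le_mul_right b (by omega)
      omega
  · refine List.map_congr_left fun k _ => ?_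
    simp only [Function.comp_apply]
    rw [Int.ediv_ediv_of_nonneg (by positivity), ← pow_add, Nat.add_mul]

-- B computes slots: strong induction on n.toNat following unpackRec's recursion.
theorem unpackRec_eq_slots (sb : Int) (hsb : 0 ≤ sb) (x : Int) (n : Int) :
    unpackRec ((1 : Int) <<< sb.toNat - 1) sb x n = slots x sb.toNat n.toNat := by
  generalize hm : n.toNat = m
  induction m using Nat.strong_induction_on generalizing x n with
  | _ m ih =>
  rw [unpackRec]
  by_cases h0 : n ≤ 0
  · have : m = 0 := by omega
    simp [h0, this, slots]
  · by_cases h1 : n = 1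
    · have : m = 1 := by omega
      simp only [h1, if_true, this]
      rw [band_mask]
      simp [slots, List.range_succ]
    · simp only [h0, if_false, h1, if_false]
      have hf : PySem.Int.floordiv n 2 = n / 2 :=
        PySem.Int.floordiv_eq_ediv_of_pos (by norm_num)
      rw [hf]
      have hcut : (n / 2 * sb).toNat = (n / 2).toNat * sb.toNat :=
        Int.toNat_mul (by omega) hsb
      have hlo : ∀ c : Nat, x - (x >>> c) <<< c = x % 2 ^ c := by
        intro c
        rw [Int.shiftRight_eq_div_pow, Int.shiftLeft_eq, Int.emod_def]
        push_cast
        ring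
      rw [hcut, hlo, Int.shiftRight_eq_div_pow,
          ih (n / 2).toNat (by omega) _ (n / 2) rfl,
          ih (n - n / 2).toNat (by omega) _ (n - n / 2) rfl]
      push_cast
      rw [show m = (n / 2).toNat + (n - n / 2).toNat by omega,
          slots_split x sb.toNat (n / 2).toNat ((n - n / 2).toNat)]

-- A's loop invariant: after n iterations the accumulator holds the first n slots
-- (as band of shifted values) and the running value is packed_value shifted by n·slot_bits.
theorem unpack_loop_eq (pv : Int) (b : Nat) (n : Nat) (mask : Int) :
    (List.range n).foldl
      (fun (st : List Int × Int) (_ : Nat) => (st.1 ++ [PySem.Int.band st.2 mask], st.2 >>> b))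
      ([], pv)
    = ((List.range n).map (fun k => PySem.Int.band (pv >>> (k * b)) mask), pv >>> (n * b)) := by
  induction n with
  | zero => simp
  | succ m ih =>
    rw [List.range_succ, List.foldl_append, List.map_append, ih]
    simp [Int.shiftRight_add, Nat.succ_mul, Nat.mul_comm]

theorem unpack_plaintext_spec : Claim_equal_unpack_plaintext := by
  intro pv ps sb _ hsb
  unfold Spec_unpack_plaintext unpack_plaintext unpack_plaintext_alt
  dsimp only
  rw [unpackRec_eq_slots sb hsb]
  by_cases h : ps ≤ 0
  · rw [PySem.List.pyRange_one_eq_nil h]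
    simp [slots, show ps.toNat = 0 by omega]
  · replace h : 0 < ps := by omega
    rw [show ps = (ps.toNat : Int) from (Int.toNat_of_nonneg h.le).symm,
        PySem.List.pyRange_zero_nat, List.foldl_map,
        unpack_loop_eq pv sb.toNat ps.toNat]
    unfold slots
    refine List.map_congr_left fun k _ => ?_
    rw [band_mask, Int.shiftRight_eq_div_pow]
    push_cast
    rfl
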